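-- pv_equiv track=rewrite | github.com/holunda-io/bpm-ai-inference | bpm_ai_inference/token_classification/transformers_token_classifier.py | filter_and_join
-- ===== SOURCE A (Python) =====
-- DEFAULT_TAGS_TO_JOIN = ['NOUN', 'PROPN', 'NUM', 'SYM', 'X']
--
-- def filter_and_join(tags, tags_to_join=None):
--     if tags_to_join is None:
--         tags_to_join = DEFAULT_TAGS_TO_JOIN
--     result = []
--     current_word = ""
--     prev_tag = None
--
--     for token, tag in tags:
--         if tag in tags_to_join:
--             if prev_tag not in tags_to_join and current_word:
--                 result.append(current_word.strip())
--                 current_word = ""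
--             current_word += token
--         else:
--             if current_word:
--                 result.append(current_word.strip())
--                 current_word = ""
--         prev_tag = tag
--
--     if current_word:
--         result.append(current_word.strip())
--     return result
-- ===== SOURCE B (Python) =====
-- DEFAULT_TAGS_TO_JOIN = ['NOUN', 'PROPN', 'NUM', 'SYM', 'X']
--
--
-- def filter_and_join(tags, tags_to_join=None):
--     # Run-grouping recursion: peel off the leading run of equal membership-key,
--     # emit its joined word when the key is True, recurse on the remainder.
--     if tags_to_join is None:
--         tags_to_join = DEFAULT_TAGS_TO_JOIN
--     if not tags:
--         return []
--     token, tag = tags[0]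
--     key = tag in tags_to_join
--     i = 1
--     while i < len(tags) and (tags[i][1] in tags_to_join) == key:
--         i += 1
--     tail = filter_and_join(tags[i:], tags_to_join)
--     if key:
--         word = token + "".join(t for t, _ in tags[1:i])
--         if word:
--             return [word.strip()] + tail
--     return tail
-- ===== Notes on version B (the rewrite author's own statement) =====
-- stated objective: alternative
-- what changed: Replaced A's prev_tag/current_word state machine (mutable accumulator with a flush-on-transition branch) by a run-grouping recursion that peels off each maximal run of equal membership-key, joins the run's tokens when the key is in tags_to_join, and recurses on the remainder.
import Mathlib
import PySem

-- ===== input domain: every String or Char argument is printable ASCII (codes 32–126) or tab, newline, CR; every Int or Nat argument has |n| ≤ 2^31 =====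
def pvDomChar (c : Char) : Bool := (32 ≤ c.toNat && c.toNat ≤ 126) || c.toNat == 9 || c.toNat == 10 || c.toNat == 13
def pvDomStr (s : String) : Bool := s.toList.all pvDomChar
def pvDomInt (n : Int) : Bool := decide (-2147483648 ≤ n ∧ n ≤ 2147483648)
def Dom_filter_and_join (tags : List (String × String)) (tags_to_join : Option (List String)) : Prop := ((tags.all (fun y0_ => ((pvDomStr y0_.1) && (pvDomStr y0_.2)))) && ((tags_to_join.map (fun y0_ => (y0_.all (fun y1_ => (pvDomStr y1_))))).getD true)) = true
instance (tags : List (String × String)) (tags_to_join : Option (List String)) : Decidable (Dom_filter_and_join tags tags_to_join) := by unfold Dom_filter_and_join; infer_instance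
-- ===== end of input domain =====

-- B replaces A's prev_tag/current_word state machine by a run-grouping recursion
-- (peel the leading run of equal membership-key, join it, recurse); objective: alternative decomposition, not faster.

def DEFAULT_TAGS_TO_JOIN : List String := ["NOUN", "PROPN", "NUM", "SYM", "X"]

-- ===== PORT A =====
-- Python strings are carried as List Char (PySem's exact representation); 'tag in tags_to_join' is fajKey.
def fajKey (ttj : List String) (tag : String) : Bool := ttj.contains tag

-- 'prev_tag not in tags_to_join': prev_tag = none (Python None) is never in a list of strings
def fajPrevOut (ttj : List String) : Option String → Bool
  | none => true
  | some pt => !fajKey ttj pt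

-- one iteration of A's for-loop over state (result, current_word, prev_tag)
def fajStep (ttj : List String) (st : List String × List Char × Option String)
    (p : String × String) : List String × List Char × Option String :=
  if fajKey ttj p.2 then
    if fajPrevOut ttj st.2.2 && !st.2.1.isEmpty then
      (st.1 ++ [String.ofList (PySem.Chars.strip st.2.1)], [] ++ p.1.toList, some p.2)
    else
      (st.1, st.2.1 ++ p.1.toList, some p.2)
  else
    if !st.2.1.isEmpty then
      (st.1 ++ [String.ofList (PySem.Chars.strip st.2.1)], [], some p.2)
    else
      (st.1, st.2.1, some p.2)

def filter_and_join (tags : List (String × String)) (tags_to_join : Option (List String)) : List String :=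
  let ttj := tags_to_join.getD DEFAULT_TAGS_TO_JOIN
  let st := tags.foldl (fajStep ttj) ([], [], none)
  if !st.2.1.isEmpty then st.1 ++ [String.ofList (PySem.Chars.strip st.2.1)] else st.1

-- ===== PORT B =====
-- Source B's recursion: the leading run of equal membership-key via takeWhile/dropWhile
-- (= Source B's index scan to the first position whose key differs), join its tokens, recurse.
def filter_and_join_altGo (ttj : List String) : List (String × String) → List String
  | [] => []
  | (token, tag) :: rest =>
    let key := fajKey ttj tag
    let tail := filter_and_join_altGo ttj (rest.dropWhile (fun p => fajKey ttj p.2 == key))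
    if key then
      let word := token.toList ++
        ((rest.takeWhile (fun p => fajKey ttj p.2 == key)).map (fun p => p.1.toList)).flatten
      if !word.isEmpty then String.ofList (PySem.Chars.strip word) :: tail else tail
    else tail
termination_by l => l.length
decreasing_by
  exact Nat.lt_succ_of_le (List.Sublist.length_le (List.dropWhile_sublist _))

def filter_and_join_alt (tags : List (String × String)) (tags_to_join : Option (List String)) : List String :=
  filter_and_join_altGo (tags_to_join.getD DEFAULT_TAGS_TO_JOIN) tags

-- ===== PRECONDITION & SPEC =====
def Spec_filter_and_join (tags : List (String × String)) (tags_to_join : Option (List String)) (out : List String) : Prop := out = filter_and_join_alt tags tags_to_join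
instance (tags : List (String × String)) (tags_to_join : Option (List String)) (out : List String) : Decidable (Spec_filter_and_join tags tags_to_join out) := by unfold Spec_filter_and_join; infer_instance

-- ===== CLAIM (what is proved, stated in full; the proofs are below) =====
def Claim_equal_filter_and_join : Prop := ∀ (tags : List (String × String)) (tags_to_join : Option (List String)), Dom_filter_and_join tags tags_to_join → Spec_filter_and_join tags tags_to_join (filter_and_join tags tags_to_join)

-- ===== LEMMAS AND PROOFS =====

-- flush of a pending word: Python's 'if current_word: result.append(current_word.strip())'
def fajFlush (cur : List Char) : List String :=
  if !cur.isEmpty then [String.ofList (PySem.Chars.strip cur)] else []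

-- common specification: process tags with a pending word cur
def fajG (ttj : List String) (cur : List Char) : List (String × String) → List String
  | [] => fajFlush cur
  | (token, tag) :: rest =>
    if fajKey ttj tag then fajG ttj (cur ++ token.toList) rest
    else fajFlush cur ++ fajG ttj [] rest

def fajFinish (st : List String × List Char × Option String) : List String :=
  if !st.2.1.isEmpty then st.1 ++ [String.ofList (PySem.Chars.strip st.2.1)] else st.1

-- A's loop equals fajG, under the invariant: cur is empty whenever prev_tag is not a joined tag
lemma faj_foldl_eq_fajG (ttj : List String) :
    ∀ (tags : List (String × String)) (result : List String) (cur : List Char) (prev : Option String),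
      (fajPrevOut ttj prev = true → cur = []) →
      fajFinish (tags.foldl (fajStep ttj) (result, cur, prev)) = result ++ fajG ttj cur tags := by
  intro tags
  induction tags with
  | nil =>
    intro result cur prev _
    simp only [List.foldl_nil, fajG, fajFinish, fajFlush]
    split <;> simp
  | cons p rest ih =>
    intro result cur prev hinv
    obtain ⟨token, tag⟩ := p
    rw [List.foldl_cons]
    by_cases hk : fajKey ttj tag = true
    · have hbranch : (fajPrevOut ttj prev && !cur.isEmpty) = false := by
        by_cases hp : fajPrevOut ttj prev = true
        · have := hinv hp; subst this; simp [hp]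
        · simp [Bool.eq_false_iff.mpr hp]
      have hstep : fajStep ttj (result, cur, prev) (token, tag)
          = (result, cur ++ token.toList, some tag) := by
        simp [fajStep, hk, hbranch]
      rw [hstep, ih result (cur ++ token.toList) (some tag)
        (by simp [fajPrevOut, hk])]
      simp [fajG, hk]
    · by_cases hc : cur.isEmpty
      · have hstep : fajStep ttj (result, cur, prev) (token, tag)
            = (result, cur, some tag) := by
          simp [fajStep, hk, hc]
        rw [hstep, ih result cur (some tag) (fun _ => List.isEmpty_iff.mp hc),
          List.isEmpty_iff.mp hc]
        simp [fajG, hk, fajFlush]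
      · have hstep : fajStep ttj (result, cur, prev) (token, tag)
            = (result ++ [String.ofList (PySem.Chars.strip cur)], [], some tag) := by
          simp [fajStep, hk, hc]
        rw [hstep, ih (result ++ [String.ofList (PySem.Chars.strip cur)]) [] (some tag)
          (fun _ => rfl)]
        simp [fajG, hk, fajFlush, hc]

-- a run of joined tags accumulates its tokens onto cur
lemma fajG_true_run (ttj : List String) :
    ∀ (xs : List (String × String)) (cur : List Char) (rest : List (String × String)),
      (∀ p ∈ xs, fajKey ttj p.2 = true) →
      fajG ttj cur (xs ++ rest) = fajG ttj (cur ++ (xs.map (fun p => p.1.toList)).flatten) rest := by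
  intro xs
  induction xs with
  | nil => intro cur rest _; simp
  | cons p xs ih =>
    intro cur rest hall
    obtain ⟨token, tag⟩ := p
    have hk : fajKey ttj tag = true := hall (token, tag) (by simp)
    simp only [List.cons_append, fajG, hk, if_true]
    rw [ih (cur ++ token.toList) rest (fun q hq => hall q (by simp [hq]))]
    simp [List.append_assoc]

-- a run of non-joined tags with empty pending word is skipped
lemma fajG_false_run (ttj : List String) :
    ∀ (xs : List (String × String)) (rest : List (String × String)),
      (∀ p ∈ xs, fajKey ttj p.2 = false) →
      fajG ttj [] (xs ++ rest) = fajG ttj [] rest := by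
  intro xs
  induction xs with
  | nil => intro rest _; simp
  | cons p xs ih =>
    intro rest hall
    obtain ⟨token, tag⟩ := p
    have hk : fajKey ttj tag = false := hall (token, tag) (by simp)
    simp only [List.cons_append, fajG, hk, Bool.false_eq_true, if_false, fajFlush,
      List.isEmpty_nil, Bool.not_true, List.nil_append]
    exact ih rest (fun q hq => hall q (by simp [hq]))

-- flushing at a run boundary (end of input, or a non-joined tag next)
lemma fajG_flush_boundary (ttj : List String) (cur : List Char) (rest : List (String × String))
    (h : rest = [] ∨ ∃ token tag rest', rest = (token, tag) :: rest' ∧ fajKey ttj tag = false) :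
    fajG ttj cur rest = fajFlush cur ++ fajG ttj [] rest := by
  rcases h with h | ⟨token, tag, rest', h, hk⟩
  · subst h; simp [fajG, fajFlush]
  · subst h
    simp [fajG, hk, fajFlush]

-- B equals fajG with empty pending word
lemma faj_altGo_eq_fajG (ttj : List String) :
    ∀ (tags : List (String × String)), filter_and_join_altGo ttj tags = fajG ttj [] tags := by
  intro tags
  induction hn : tags.length using Nat.strong_induction_on generalizing tags with
  | _ n ih =>
    match tags with
    | [] => simp [filter_and_join_altGo, fajG, fajFlush]
    | (token, tag) :: rest =>
      subst hn
      cases hk : fajKey ttj tag with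
      | true =>
        have hsplit := List.takeWhile_append_dropWhile
          (p := fun p => fajKey ttj p.2) (l := rest)
        have hlen : (rest.dropWhile (fun p => fajKey ttj p.2)).length
            < ((token, tag) :: rest).length :=
          Nat.lt_succ_of_le (List.Sublist.length_le (List.dropWhile_sublist _))
        have htail := ih _ hlen _ rfl
        have hall : ∀ p ∈ rest.takeWhile (fun p => fajKey ttj p.2),
            fajKey ttj p.2 = true := by
          intro p hp
          have := List.mem_takeWhile_imp hp
          simpa using this
        have hboundary : (rest.dropWhile (fun p => fajKey ttj p.2)) = [] ∨
            ∃ tok tg rest', (rest.dropWhile (fun p => fajKey ttj p.2))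
              = (tok, tg) :: rest' ∧ fajKey ttj tg = false := by
          cases hdw : rest.dropWhile (fun p => fajKey ttj p.2) with
          | nil => exact Or.inl rfl
          | cons q rest' =>
            refine Or.inr ⟨q.1, q.2, rest', by simp, ?_⟩
            have hhd := List.head?_dropWhile_not
              (p := fun p => fajKey ttj p.2) (l := rest)
            rw [hdw] at hhd
            simpa using hhd
        rw [filter_and_join_altGo]
        simp only [hk, if_true, beq_true, htail]
        conv_rhs => rw [fajG]
        simp only [hk, if_true]
        conv_rhs => rw [← hsplit]
        rw [fajG_true_run ttj _ _ _ hall]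
        conv_rhs => rw [fajG_flush_boundary ttj _ _ hboundary]
        simp only [fajFlush]
        split <;> rename_i hw <;> simp [hw]
      | false =>
        have hsplit := List.takeWhile_append_dropWhile
          (p := fun p => !fajKey ttj p.2) (l := rest)
        have hlen : (rest.dropWhile (fun p => !fajKey ttj p.2)).length
            < ((token, tag) :: rest).length :=
          Nat.lt_succ_of_le (List.Sublist.length_le (List.dropWhile_sublist _))
        have htail := ih _ hlen _ rfl
        have hall : ∀ p ∈ rest.takeWhile (fun p => !fajKey ttj p.2),
            fajKey ttj p.2 = false := by
          intro p hp
          have := List.mem_takeWhile_imp hp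
          simpa using this
        rw [filter_and_join_altGo]
        simp only [hk, Bool.false_eq_true, if_false, beq_false, htail]
        conv_rhs => rw [fajG]
        simp only [hk, Bool.false_eq_true, if_false, fajFlush, List.isEmpty_nil,
          Bool.not_true, List.nil_append]
        conv_rhs => rw [← hsplit]
        rw [fajG_false_run ttj _ _ hall]

-- ===== VERDICT (by name: the statement is the Claim_ definition above) =====
theorem filter_and_join_spec : Claim_equal_filter_and_join := by
  intro tags tags_to_join _
  unfold Spec_filter_and_join filter_and_join filter_and_join_alt
  rw [faj_altGo_eq_fajG]
  exact faj_foldl_eq_fajG _ tags [] [] none (fun _ => rfl)
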